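-- pv_equiv track=rewrite | github.com/sproutsai-engg/coding_question_generator | json_files/python_codes/Q_1700.py | min_time_to_remove_balloons
-- ===== SOURCE A (Python) =====
-- def min_time_to_remove_balloons(colors, neededTime):
--     n = len(colors)
--     INF = 10**9
--     dp = [[INF] * 26 for _ in range(n)]
--
--     for color in range(26):
--         if colors[0] != chr(ord('A') + color):
--             dp[0][color] = neededTime[0]
--
--     for i in range(1, n):
--         for color1 in range(26):
--             for color2 in range(26):
--                 if color1 != color2 and colors[i] != chr(ord('A') + color1):
--                     dp[i][color1] = min(dp[i][color1], dp[i-1][color2] + neededTime[i])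
--
--     ans = INF
--     for color in range(26):
--         ans = min(ans, dp[n-1][color])
--
--     return ans
-- ===== SOURCE B (Python) =====
-- def min_time_to_remove_balloons(colors, neededTime):
--     # Rolling single DP row; exclude-one minimum from (min, argmin, second-min)
--     # of the previous row instead of A's inner 26x26 scan.
--     INF = 10**9
--     row = [neededTime[0] if colors[0] != chr(ord('A') + c) else INF
--            for c in range(26)]
--     for i in range(1, len(colors)):
--         c1 = min(range(26), key=row.__getitem__)
--         m1 = row[c1]
--         m2 = min(row[c] for c in range(26) if c != c1)
--         t = neededTime[i]
--         row = [min(INF, (m2 if c == c1 else m1) + t)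
--                if colors[i] != chr(ord('A') + c) else INF
--                for c in range(26)]
--     return min(min(row), INF)
-- ===== Notes on version B (the rewrite author's own statement) =====
-- stated objective: faster
-- what changed: B keeps a single rolling DP row and computes each exclude-one minimum from the previous row's minimum, its first argmin and the second minimum (computed once per position), instead of A's full dp table with an inner 26x26 scan per position.
import Mathlib
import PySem

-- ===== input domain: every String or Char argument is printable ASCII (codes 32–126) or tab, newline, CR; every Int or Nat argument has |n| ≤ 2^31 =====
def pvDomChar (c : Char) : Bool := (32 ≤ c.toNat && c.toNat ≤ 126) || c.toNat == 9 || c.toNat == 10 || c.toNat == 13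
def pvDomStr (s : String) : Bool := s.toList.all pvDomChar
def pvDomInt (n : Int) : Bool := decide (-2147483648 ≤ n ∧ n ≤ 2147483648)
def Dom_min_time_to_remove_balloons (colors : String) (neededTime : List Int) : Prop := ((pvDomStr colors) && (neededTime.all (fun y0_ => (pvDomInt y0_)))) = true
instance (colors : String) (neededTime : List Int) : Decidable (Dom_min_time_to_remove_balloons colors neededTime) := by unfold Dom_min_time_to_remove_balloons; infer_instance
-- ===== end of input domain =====

-- B replaces A's inner 26x26 scan per position by the minimum / first argmin /
-- second minimum of the previous DP row, kept in a single rolling row (objective: faster).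

-- ===== PORT A =====
def min_time_to_remove_balloons (colors : String) (neededTime : List Int) : Int :=
  let cs := colors.toList
  let n := cs.length
  let INF : Int := 10 ^ 9
  let dp0 : List (List Int) := List.replicate n (List.replicate 26 INF)
  let dp1 := (List.range 26).foldl (fun dp color =>
      if cs.getD 0 ' ' ≠ Char.ofNat (65 + color) then
        dp.set 0 ((dp.getD 0 []).set color (neededTime.getD 0 0))
      else dp) dp0
  let dp2 := (List.range' 1 (n - 1)).foldl (fun dp i =>
      (List.range 26).foldl (fun dp color1 =>
        (List.range 26).foldl (fun dp color2 =>
          if color1 ≠ color2 ∧ cs.getD i ' ' ≠ Char.ofNat (65 + color1) then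
            dp.set i ((dp.getD i []).set color1
              (min ((dp.getD i []).getD color1 0)
                   ((dp.getD (i - 1) []).getD color2 0 + neededTime.getD i 0)))
          else dp) dp) dp) dp1
  (List.range 26).foldl (fun ans color => min ans ((dp2.getD (n - 1) []).getD color 0)) INF

-- ===== PORT B =====
-- min of a nonempty list (Python's min(xs)); the 0 default is never reached on B's rows
def pvMin1 : List Int → Int
  | [] => 0
  | h :: t => t.foldl min h

def min_time_to_remove_balloons_alt (colors : String) (neededTime : List Int) : Int :=
  let cs := colors.toList
  let INF : Int := 10 ^ 9
  let row0 := (List.range 26).map (fun c =>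
      if cs.getD 0 ' ' ≠ Char.ofNat (65 + c) then neededTime.getD 0 0 else INF)
  let row := (List.range' 1 (cs.length - 1)).foldl (fun row i =>
      let c1 := (List.range 26).foldl (fun best c =>
          if row.getD c 0 < row.getD best 0 then c else best) 0
      let m1 := row.getD c1 0
      let m2 := pvMin1 (((List.range 26).filter (fun c => c ≠ c1)).map (fun c => row.getD c 0))
      let t := neededTime.getD i 0
      (List.range 26).map (fun c =>
        if cs.getD i ' ' ≠ Char.ofNat (65 + c) then
          min INF ((if c = c1 then m2 else m1) + t)
        else INF)) row0
  min (pvMin1 row) INF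

-- ===== PRECONDITION & SPEC =====
-- Pre_ excludes exactly the inputs on which Python A raises IndexError:
-- an empty colors string, or fewer neededTime entries than balloons.
def Pre_min_time_to_remove_balloons (colors : String) (neededTime : List Int) : Prop :=
  1 ≤ colors.toList.length ∧ colors.toList.length ≤ neededTime.length
instance (colors : String) (neededTime : List Int) : Decidable (Pre_min_time_to_remove_balloons colors neededTime) := by unfold Pre_min_time_to_remove_balloons; infer_instance
def pvWitness_min_time_to_remove_balloons : String × List Int := ("aB", [3, -2])

def Spec_min_time_to_remove_balloons (colors : String) (neededTime : List Int) (out : Int) : Prop := out = min_time_to_remove_balloons_alt colors neededTime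
instance (colors : String) (neededTime : List Int) (out : Int) : Decidable (Spec_min_time_to_remove_balloons colors neededTime out) := by unfold Spec_min_time_to_remove_balloons; infer_instance

-- ===== CLAIM (what is proved, stated in full; the proofs are below) =====
def Claim_equal_min_time_to_remove_balloons : Prop := ∀ (colors : String) (neededTime : List Int), Dom_min_time_to_remove_balloons colors neededTime → Pre_min_time_to_remove_balloons colors neededTime → Spec_min_time_to_remove_balloons colors neededTime (min_time_to_remove_balloons colors neededTime)

-- ===== LEMMAS AND PROOFS =====

-- ---- getD / set helpers ----
theorem pv_getD_set_self {α : Type} (l : List α) (i : Nat) (a d : α) (h : i < l.length) :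
    (l.set i a).getD i d = a := by
  simp [List.getD, h]

theorem pv_getD_set_ne {α : Type} (l : List α) (i j : Nat) (a d : α) (h : i ≠ j) :
    (l.set i a).getD j d = l.getD j d := by
  simp [List.getD, List.getElem?_set_ne h]

theorem pv_set_getD_self {α : Type} (l : List α) (i : Nat) (d : α) (h : i < l.length) :
    l.set i (l.getD i d) = l := by
  simp [List.getD, List.getElem?_eq_getElem h, List.set_getElem_self]

-- ---- foldl-min toolbox ----
theorem pv_foldl_min_min (l : List Int) : ∀ a b : Int, l.foldl min (min a b) = min a (l.foldl min b) := by
  induction l with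
  | nil => intro a b; rfl
  | cons h t ih => intro a b; simp only [List.foldl_cons]; rw [min_assoc]; exact ih a (min b h)

theorem pv_foldl_min_le (l : List Int) : ∀ a : Int, l.foldl min a ≤ a := by
  induction l with
  | nil => intro a; exact le_refl a
  | cons h t ih => intro a; exact le_trans (ih (min a h)) (min_le_left a h)

theorem pv_foldl_min_le_mem (l : List Int) : ∀ (a x : Int), x ∈ l → l.foldl min a ≤ x := by
  induction l with
  | nil => intro a x hx; cases hx
  | cons h t ih =>
      intro a x hx
      rcases List.mem_cons.mp hx with rfl | hx
      · exact le_trans (pv_foldl_min_le t (min a x)) (min_le_right a x)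
      · exact ih (min a h) x hx

theorem pv_foldl_min_mem (l : List Int) : ∀ a : Int, l.foldl min a = a ∨ l.foldl min a ∈ l := by
  induction l with
  | nil => intro a; exact Or.inl rfl
  | cons h t ih =>
      intro a
      rcases ih (min a h) with heq | hmem
      · rcases min_choice a h with hm | hm
        · exact Or.inl (by rw [List.foldl_cons, heq, hm])
        · exact Or.inr (by rw [List.foldl_cons, heq, hm]; exact List.mem_cons_self)
      · exact Or.inr (List.mem_cons_of_mem _ hmem)

theorem pv_min_start (l : List Int) (hl : l ≠ []) (a : Int) : l.foldl min a = min a (pvMin1 l) := by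
  cases l with
  | nil => exact absurd rfl hl
  | cons h t => simp only [List.foldl_cons, pvMin1]; exact pv_foldl_min_min t a h

theorem pv_pvMin1_le (l : List Int) (x : Int) (hx : x ∈ l) : pvMin1 l ≤ x := by
  cases l with
  | nil => cases hx
  | cons h t =>
      rcases List.mem_cons.mp hx with rfl | hx
      · exact pv_foldl_min_le t x
      · exact pv_foldl_min_le_mem t h x hx

theorem pv_pvMin1_mem (l : List Int) (hl : l ≠ []) : pvMin1 l ∈ l := by
  cases l with
  | nil => exact absurd rfl hl
  | cons h t =>
      simp only [pvMin1]
      rcases pv_foldl_min_mem t h with heq | hmem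
      · rw [heq]; exact List.mem_cons_self
      · exact List.mem_cons_of_mem _ hmem

theorem pv_foldl_min_map_add (t : Int) (l : List Int) :
    ∀ a : Int, (l.map (fun x => x + t)).foldl min (a + t) = l.foldl min a + t := by
  induction l with
  | nil => intro a; rfl
  | cons h tl ih =>
      intro a
      simp only [List.map_cons, List.foldl_cons]
      rw [Int.min_add_right, ih]

theorem pv_pvMin1_map_add (t : Int) (l : List Int) (hl : l ≠ []) :
    pvMin1 (l.map (fun x => x + t)) = pvMin1 l + t := by
  cases l with
  | nil => exact absurd rfl hl
  | cons h tl => simp only [List.map_cons, pvMin1]; exact pv_foldl_min_map_add t tl h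

theorem pv_fold_if_filter {α : Type} (p : α → Prop) [DecidablePred p] (f : α → Int) (l : List α) :
    ∀ a : Int, l.foldl (fun x e => if p e then min x (f e) else x) a
      = ((l.filter (fun e => decide (p e))).map f).foldl min a := by
  induction l with
  | nil => intro a; rfl
  | cons h t ih =>
      intro a
      by_cases hp : p h
      · simp only [List.foldl_cons, List.filter_cons, hp, decide_true, List.map_cons, if_true]
        exact ih (min a (f h))
      · simp only [List.foldl_cons, List.filter_cons, hp, decide_false, if_false]
        exact ih a

-- ---- argmin fold ----
theorem pv_argmin (v : Nat → Int) (l : List Nat) : ∀ b : Nat,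
    (l.foldl (fun best c => if v c < v best then c else best) b = b ∨
      l.foldl (fun best c => if v c < v best then c else best) b ∈ l) ∧
    v (l.foldl (fun best c => if v c < v best then c else best) b) ≤ v b ∧
    (∀ c ∈ l, v (l.foldl (fun best c => if v c < v best then c else best) b) ≤ v c) := by
  induction l with
  | nil =>
      intro b
      refine ⟨Or.inl rfl, le_refl _, ?_⟩
      intro c hc
      cases hc
  | cons h t ih =>
      intro b
      obtain ⟨hm, hb, hall⟩ := ih (if v h < v b then h else b)
      have hb' : v (if v h < v b then h else b) ≤ v b := by
        by_cases hlt : v h < v b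
        · simp only [hlt, if_true]; exact le_of_lt hlt
        · simp only [hlt, if_false]; exact le_refl _
      have hh' : v (if v h < v b then h else b) ≤ v h := by
        by_cases hlt : v h < v b
        · simp only [hlt, if_true]; exact le_refl _
        · simp only [hlt, if_false]; exact le_of_not_gt hlt
      refine ⟨?_, ?_, ?_⟩
      · rcases hm with heq | hmem
        · rw [List.foldl_cons, heq]
          by_cases hlt : v h < v b
          · simp only [hlt, if_true]; exact Or.inr List.mem_cons_self
          · simp only [hlt, if_false]; exact Or.inl (by trivial)
        · exact Or.inr (List.mem_cons_of_mem _ hmem)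
      · exact le_trans hb hb'
      · intro c hc
        rcases List.mem_cons.mp hc with rfl | hc
        · exact le_trans hb hh'
        · exact hall c hc
-- ---- the exclude-one minimum equals (min / argmin / second-min) data ----
def argmin26 (r : List Int) : Nat :=
  (List.range 26).foldl (fun best c => if r.getD c 0 < r.getD best 0 then c else best) 0

theorem argmin26_lt (r : List Int) : argmin26 r < 26 := by
  rcases (pv_argmin (fun c => r.getD c 0) (List.range 26) 0).1 with heq | hmem
  · rw [argmin26, heq]; decide
  · exact List.mem_range.mp hmem

theorem argmin26_min (r : List Int) (c : Nat) (hc : c < 26) :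
    r.getD (argmin26 r) 0 ≤ r.getD c 0 :=
  (pv_argmin (fun c => r.getD c 0) (List.range 26) 0).2.2 c (List.mem_range.mpr hc)

-- B's step on one row (exactly the body of the fold in min_time_to_remove_balloons_alt)
def stepB (row : List Int) (ch : Char) (t : Int) : List Int :=
  let c1 := (List.range 26).foldl (fun best c => if row.getD c 0 < row.getD best 0 then c else best) 0
  let m1 := row.getD c1 0
  let m2 := pvMin1 (((List.range 26).filter (fun c => c ≠ c1)).map (fun c => row.getD c 0))
  (List.range 26).map (fun c =>
    if ch ≠ Char.ofNat (65 + c) then min (10 ^ 9) ((if c = c1 then m2 else m1) + t) else (10 ^ 9))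

theorem pv_excl_nonempty (r : List Int) (c : Nat) :
    ((List.range 26).filter (fun c2 => decide (c ≠ c2))).map (fun c2 => r.getD c2 0) ≠ [] := by
  have he : (if c = 0 then 1 else 0) ∈ (List.range 26).filter (fun c2 => decide (c ≠ c2)) := by
    by_cases h0 : c = 0 <;> simp [List.mem_filter, List.mem_range, h0]
  exact List.ne_nil_of_mem (List.mem_map_of_mem he)

theorem pv_excl_min_eq (r : List Int) (c : Nat) :
    pvMin1 (((List.range 26).filter (fun c2 => decide (c ≠ c2))).map (fun c2 => r.getD c2 0))
      = if c = argmin26 r then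
          pvMin1 (((List.range 26).filter (fun c2 => c2 ≠ argmin26 r)).map (fun c2 => r.getD c2 0))
        else r.getD (argmin26 r) 0 := by
  by_cases hceq : c = argmin26 r
  · rw [if_pos hceq]
    have hfil : (List.range 26).filter (fun c2 => decide (c ≠ c2))
        = (List.range 26).filter (fun c2 => c2 ≠ argmin26 r) := by
      apply List.filter_congr
      intro a _
      rw [hceq]
      exact decide_eq_decide.mpr ne_comm
    rw [hfil]
  · simp only [hceq, if_false]
    apply le_antisymm
    · apply pv_pvMin1_le
      apply List.mem_map_of_mem
      simp only [List.mem_filter, List.mem_range]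
      exact ⟨argmin26_lt r, by simpa using fun h => hceq h⟩
    · have hmem := pv_pvMin1_mem _ (pv_excl_nonempty r c)
      obtain ⟨c2, hc2, hval⟩ := List.mem_map.mp hmem
      have hc2' : c2 < 26 := List.mem_range.mp (List.mem_filter.mp hc2).1
      rw [← hval]
      exact argmin26_min r c2 hc2'

-- The per-row equivalence: A's inner 26×26 scan computes exactly B's step.
def stepA (prev : List Int) (ch : Char) (t : Int) : List Int :=
  (List.range 26).map (fun c =>
    if ch ≠ Char.ofNat (65 + c) then
      (List.range 26).foldl (fun x c2 => if c ≠ c2 then min x (prev.getD c2 0 + t) else x) (10 ^ 9)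
    else (10 ^ 9))

theorem stepA_length (prev : List Int) (ch : Char) (t : Int) : (stepA prev ch t).length = 26 := by
  simp [stepA]

theorem step_eq (r : List Int) (ch : Char) (t : Int) : stepA r ch t = stepB r ch t := by
  unfold stepA stepB
  apply List.map_congr_left
  intro c hcm
  have hc : c < 26 := List.mem_range.mp hcm
  by_cases hall : ch ≠ Char.ofNat (65 + c)
  · rw [if_pos hall, if_pos hall]
    rw [pv_fold_if_filter (fun c2 => c ≠ c2) (fun c2 => r.getD c2 0 + t)]
    have hmm : ((List.range 26).filter (fun c2 => decide (c ≠ c2))).map (fun c2 => r.getD c2 0 + t)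
        = (((List.range 26).filter (fun c2 => decide (c ≠ c2))).map (fun c2 => r.getD c2 0)).map
            (fun x => x + t) := by
      rw [List.map_map]; rfl
    rw [hmm, pv_min_start _ (by
        intro hnil
        exact pv_excl_nonempty r c (List.map_eq_nil_iff.mp hnil ▸ rfl)) (10 ^ 9)]
    · rw [pv_pvMin1_map_add t _ (pv_excl_nonempty r c), pv_excl_min_eq r c]
      rfl
  · rw [if_neg hall, if_neg hall]
-- ---- A's dp-table loops, reduced to stepA ----
def dpInner (i : Nat) (ch : Char) (t : Int) (dp : List (List Int)) (c1 : Nat) : List (List Int) :=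
  (List.range 26).foldl (fun dp c2 =>
    if c1 ≠ c2 ∧ ch ≠ Char.ofNat (65 + c1) then
      dp.set i ((dp.getD i []).set c1
        (min ((dp.getD i []).getD c1 0) ((dp.getD (i - 1) []).getD c2 0 + t)))
    else dp) dp

theorem dpInner_noallow (i : Nat) (ch : Char) (t : Int) (dp : List (List Int)) (c1 : Nat)
    (hall : ¬ ch ≠ Char.ofNat (65 + c1)) : dpInner i ch t dp c1 = dp := by
  unfold dpInner
  have : (fun (dp : List (List Int)) (c2 : Nat) =>
      if c1 ≠ c2 ∧ ch ≠ Char.ofNat (65 + c1) then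
        dp.set i ((dp.getD i []).set c1
          (min ((dp.getD i []).getD c1 0) ((dp.getD (i - 1) []).getD c2 0 + t)))
      else dp) = fun dp _ => dp := by
    funext dp c2
    simp [hall]
  rw [this]
  exact List.foldl_fixed (List.range 26)

theorem dpInner_allow_aux (i : Nat) (ch : Char) (t : Int) (c1 : Nat)
    (hall : ch ≠ Char.ofNat (65 + c1)) (hi : 1 ≤ i) (l : List Nat) :
    ∀ dp : List (List Int), i < dp.length → c1 < (dp.getD i []).length →
    l.foldl (fun dp c2 =>
      if c1 ≠ c2 ∧ ch ≠ Char.ofNat (65 + c1) then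
        dp.set i ((dp.getD i []).set c1
          (min ((dp.getD i []).getD c1 0) ((dp.getD (i - 1) []).getD c2 0 + t)))
      else dp) dp
    = dp.set i ((dp.getD i []).set c1
        (l.foldl (fun x c2 => if c1 ≠ c2 then min x ((dp.getD (i - 1) []).getD c2 0 + t) else x)
          ((dp.getD i []).getD c1 0))) := by
  induction l with
  | nil =>
      intro dp hlen hrow
      simp only [List.foldl_nil]
      rw [pv_set_getD_self _ c1 0 hrow, pv_set_getD_self _ i [] hlen]
  | cons c2 l ih =>
      intro dp hlen hrow
      have hii : i - 1 ≠ i := by omega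
      simp only [List.foldl_cons]
      by_cases hne : c1 ≠ c2
      · rw [if_pos (And.intro hne hall), if_pos hne]
        set v := min ((dp.getD i []).getD c1 0) ((dp.getD (i - 1) []).getD c2 0 + t) with hv
        set dp' := dp.set i ((dp.getD i []).set c1 v) with hdp'
        have hlen' : i < dp'.length := by rw [hdp', List.length_set]; exact hlen
        have hgetI : dp'.getD i [] = (dp.getD i []).set c1 v := pv_getD_set_self dp i _ [] hlen
        have hrow' : c1 < (dp'.getD i []).length := by rw [hgetI, List.length_set]; exact hrow
        rw [ih dp' hlen' hrow', hgetI]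
        have hprev : dp'.getD (i - 1) [] = dp.getD (i - 1) [] :=
          pv_getD_set_ne dp i (i - 1) _ [] hii.symm
        rw [hprev, pv_getD_set_self _ c1 v 0 hrow, List.set_set, List.set_set]
      · rw [if_neg (fun hand => hne hand.1), if_neg hne]
        exact ih dp hlen hrow

theorem dpInner_allow (i : Nat) (ch : Char) (t : Int) (dp : List (List Int)) (c1 : Nat)
    (hall : ch ≠ Char.ofNat (65 + c1)) (hi : 1 ≤ i) (hlen : i < dp.length)
    (hrow : c1 < (dp.getD i []).length) :
    dpInner i ch t dp c1
      = dp.set i ((dp.getD i []).set c1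
          ((List.range 26).foldl
            (fun x c2 => if c1 ≠ c2 then min x ((dp.getD (i - 1) []).getD c2 0 + t) else x)
            ((dp.getD i []).getD c1 0))) :=
  dpInner_allow_aux i ch t c1 hall hi (List.range 26) dp hlen hrow

theorem dpRow (i : Nat) (ch : Char) (t : Int) (hi : 1 ≤ i) (l : List Nat) :
    ∀ dp : List (List Int), l.Nodup → (∀ c ∈ l, c < 26) → i < dp.length →
      (dp.getD i []).length = 26 →
    (l.foldl (dpInner i ch t) dp).length = dp.length ∧
    (∀ j, j ≠ i → (l.foldl (dpInner i ch t) dp).getD j [] = dp.getD j []) ∧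
    ((l.foldl (dpInner i ch t) dp).getD i []).length = 26 ∧
    (∀ c, c < 26 → ((l.foldl (dpInner i ch t) dp).getD i []).getD c 0 =
      if c ∈ l ∧ ch ≠ Char.ofNat (65 + c) then
        (List.range 26).foldl
          (fun x c2 => if c ≠ c2 then min x ((dp.getD (i - 1) []).getD c2 0 + t) else x)
          ((dp.getD i []).getD c 0)
      else (dp.getD i []).getD c 0) := by
  induction l with
  | nil =>
      intro dp _ _ _ hrow
      refine ⟨rfl, fun j _ => rfl, hrow, ?_⟩
      intro c _
      simp
  | cons c1 l ih =>
      intro dp hnd h26 hlen hrow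
      have hii : i - 1 ≠ i := by omega
      have hc1 : c1 < 26 := h26 c1 List.mem_cons_self
      have hnd' : l.Nodup := (List.nodup_cons.mp hnd).2
      have hc1nl : c1 ∉ l := (List.nodup_cons.mp hnd).1
      by_cases hall : ch ≠ Char.ofNat (65 + c1)
      · have hstep := dpInner_allow i ch t dp c1 hall hi hlen (by omega)
        set v := (List.range 26).foldl
            (fun x c2 => if c1 ≠ c2 then min x ((dp.getD (i - 1) []).getD c2 0 + t) else x)
            ((dp.getD i []).getD c1 0) with hv
        simp only [List.foldl_cons, hstep]
        set dp' := dp.set i ((dp.getD i []).set c1 v) with hdp'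
        have hlen' : i < dp'.length := by simpa [hdp'] using hlen
        have hgetI : dp'.getD i [] = (dp.getD i []).set c1 v := pv_getD_set_self dp i _ [] hlen
        have hrow' : (dp'.getD i []).length = 26 := by rw [hgetI, List.length_set]; exact hrow
        obtain ⟨ihlen, ihother, ihrowlen, ihentry⟩ :=
          ih dp' hnd' (fun c hc => h26 c (List.mem_cons_of_mem _ hc)) hlen' hrow'
        have hprev : dp'.getD (i - 1) [] = dp.getD (i - 1) [] :=
          pv_getD_set_ne dp i (i - 1) _ [] hii.symm
        refine ⟨by rw [ihlen, hdp', List.length_set], ?_, ihrowlen, ?_⟩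
        · intro j hj
          rw [ihother j hj, hdp', pv_getD_set_ne dp i j _ [] (Ne.symm hj)]
        · intro c hc
          rw [ihentry c hc, hprev, hgetI]
          by_cases hcc1 : c = c1
          · subst hcc1
            have hcl : c ∉ l := hc1nl
            simp only [hcl, false_and, if_false]
            rw [pv_getD_set_self _ c v 0 (by omega)]
            rw [if_pos (And.intro (List.mem_cons_self) hall)]
          · rw [pv_getD_set_ne _ c1 c v 0 (Ne.symm hcc1)]
            simp only [List.mem_cons, hcc1, false_or]
      · rw [List.foldl_cons, dpInner_noallow i ch t dp c1 hall]
        obtain ⟨ihlen, ihother, ihrowlen, ihentry⟩ :=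
          ih dp hnd' (fun c hc => h26 c (List.mem_cons_of_mem _ hc)) hlen hrow
        refine ⟨ihlen, ihother, ihrowlen, ?_⟩
        intro c hc
        rw [ihentry c hc]
        by_cases hcc1 : c = c1
        · subst hcc1
          rw [if_neg (fun hand => hc1nl hand.1), if_neg (fun hand => hall hand.2)]
        · simp only [List.mem_cons, hcc1, false_or]

theorem dpStep (i : Nat) (ch : Char) (t : Int) (dp : List (List Int)) (hi : 1 ≤ i)
    (hlen : i < dp.length) (hrow : dp.getD i [] = List.replicate 26 (10 ^ 9)) :
    (List.range 26).foldl (dpInner i ch t) dp = dp.set i (stepA (dp.getD (i - 1) []) ch t) := by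
  obtain ⟨h1, h2, h3, h4⟩ := dpRow i ch t hi (List.range 26) dp List.nodup_range
    (fun c hc => List.mem_range.mp hc) hlen (by rw [hrow]; simp)
  apply List.ext_getElem (by rw [h1, List.length_set])
  intro j hj1 hj2
  by_cases hji : j = i
  · subst hji
    rw [List.getElem_set_self (h := by omega),
        ← List.getD_eq_getElem ((List.range 26).foldl (dpInner j ch t) dp) [] hj1]
    apply List.ext_getElem (by rw [h3, stepA_length])
    intro c hc1 hc2
    have hc : c < 26 := by
      have := stepA_length (dp.getD (j - 1) []) ch t
      omega
    rw [← List.getD_eq_getElem _ 0 hc1, h4 c hc]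
    simp only [stepA, List.getElem_map, List.getElem_range, List.mem_range, hc, true_and]
    rw [hrow, List.getD_replicate _ hc]
  · rw [List.getElem_set_ne (h := fun h => hji h.symm),
        ← List.getD_eq_getElem ((List.range 26).foldl (dpInner i ch t) dp) [] hj1,
        h2 j hji, List.getD_eq_getElem dp [] (by omega)]

theorem dpLoop (cs : List Char) (nt : List Int) (k : Nat) :
    ∀ (i : Nat) (dp : List (List Int)), 1 ≤ i → i + k ≤ dp.length →
    (∀ j, i ≤ j → j < dp.length → dp.getD j [] = List.replicate 26 (10 ^ 9)) →
    (((List.range' i k).foldl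
        (fun dp j => (List.range 26).foldl (dpInner j (cs.getD j ' ') (nt.getD j 0)) dp)
        dp).getD (i + k - 1) [])
      = (List.range' i k).foldl (fun r j => stepA r (cs.getD j ' ') (nt.getD j 0))
          (dp.getD (i - 1) []) := by
  induction k with
  | zero =>
      intro i dp hi hk hinv
      simp
  | succ k ihk =>
      intro i dp hi hk hinv
      rw [List.range'_succ, List.foldl_cons, List.foldl_cons]
      have hlen : i < dp.length := by omega
      rw [dpStep i (cs.getD i ' ') (nt.getD i 0) dp hi hlen (hinv i (le_refl i) hlen)]
      set dp' := dp.set i (stepA (dp.getD (i - 1) []) (cs.getD i ' ') (nt.getD i 0)) with hdp'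
      have hlen' : dp'.length = dp.length := by simp [hdp']
      have hinv' : ∀ j, i + 1 ≤ j → j < dp'.length → dp'.getD j [] = List.replicate 26 (10 ^ 9) := by
        intro j hj hjl
        rw [hdp', pv_getD_set_ne dp i j _ [] (by omega)]
        exact hinv j (by omega) (by omega)
      have := ihk (i + 1) dp' (by omega) (by omega) hinv'
      have harith : i + 1 + k - 1 = i + (k + 1) - 1 := by omega
      rw [harith] at this
      rw [this, hdp', Nat.add_sub_cancel, pv_getD_set_self dp i _ [] hlen]

theorem dpInit (ch : Char) (v0 : Int) (l : List Nat) :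
    ∀ dp : List (List Int), l.Nodup → (∀ c ∈ l, c < 26) → 0 < dp.length →
      (dp.getD 0 []).length = 26 →
    (l.foldl (fun dp c => if ch ≠ Char.ofNat (65 + c) then
        dp.set 0 ((dp.getD 0 []).set c v0) else dp) dp).length = dp.length ∧
    (∀ j, j ≠ 0 → (l.foldl (fun dp c => if ch ≠ Char.ofNat (65 + c) then
        dp.set 0 ((dp.getD 0 []).set c v0) else dp) dp).getD j [] = dp.getD j []) ∧
    ((l.foldl (fun dp c => if ch ≠ Char.ofNat (65 + c) then
        dp.set 0 ((dp.getD 0 []).set c v0) else dp) dp).getD 0 []).length = 26 ∧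
    (∀ c, c < 26 → ((l.foldl (fun dp c => if ch ≠ Char.ofNat (65 + c) then
        dp.set 0 ((dp.getD 0 []).set c v0) else dp) dp).getD 0 []).getD c 0 =
      if c ∈ l ∧ ch ≠ Char.ofNat (65 + c) then v0 else (dp.getD 0 []).getD c 0) := by
  induction l with
  | nil =>
      intro dp _ _ _ hrow
      refine ⟨rfl, fun j _ => rfl, hrow, ?_⟩
      intro c _
      simp
  | cons c1 l ih =>
      intro dp hnd h26 hlen hrow
      have hc1 : c1 < 26 := h26 c1 List.mem_cons_self
      have hnd' : l.Nodup := (List.nodup_cons.mp hnd).2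
      have hc1nl : c1 ∉ l := (List.nodup_cons.mp hnd).1
      by_cases hall : ch ≠ Char.ofNat (65 + c1)
      · simp only [List.foldl_cons]
        rw [if_pos hall]
        set dp' := dp.set 0 ((dp.getD 0 []).set c1 v0) with hdp'
        have hlen' : 0 < dp'.length := by simpa [hdp'] using hlen
        have hgetI : dp'.getD 0 [] = (dp.getD 0 []).set c1 v0 := pv_getD_set_self dp 0 _ [] hlen
        have hrow' : (dp'.getD 0 []).length = 26 := by rw [hgetI, List.length_set]; exact hrow
        obtain ⟨ihlen, ihother, ihrowlen, ihentry⟩ :=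
          ih dp' hnd' (fun c hc => h26 c (List.mem_cons_of_mem _ hc)) hlen' hrow'
        refine ⟨by rw [ihlen, hdp', List.length_set], ?_, ihrowlen, ?_⟩
        · intro j hj
          rw [ihother j hj, hdp', pv_getD_set_ne dp 0 j _ [] (Ne.symm hj)]
        · intro c hc
          rw [ihentry c hc, hgetI]
          by_cases hcc1 : c = c1
          · subst hcc1
            simp only [hc1nl, false_and, if_false]
            rw [pv_getD_set_self _ c v0 0 (by omega)]
            rw [if_pos (And.intro (List.mem_cons_self) hall)]
          · rw [pv_getD_set_ne _ c1 c v0 0 (Ne.symm hcc1)]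
            simp only [List.mem_cons, hcc1, false_or]
      · simp only [List.foldl_cons]
        rw [if_neg hall]
        obtain ⟨ihlen, ihother, ihrowlen, ihentry⟩ :=
          ih dp hnd' (fun c hc => h26 c (List.mem_cons_of_mem _ hc)) hlen hrow
        refine ⟨ihlen, ihother, ihrowlen, ?_⟩
        intro c hc
        rw [ihentry c hc]
        by_cases hcc1 : c = c1
        · subst hcc1
          rw [if_neg (fun hand => hc1nl hand.1), if_neg (fun hand => hall hand.2)]
        · simp only [List.mem_cons, hcc1, false_or]

-- row 0 of both programs
def row0f (colors : String) (nt : List Int) : List Int :=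
  (List.range 26).map (fun c =>
    if colors.toList.getD 0 ' ' ≠ Char.ofNat (65 + c) then nt.getD 0 0 else (10 ^ 9))

theorem row0f_length (colors : String) (nt : List Int) : (row0f colors nt).length = 26 := by
  simp [row0f]

theorem iter_len (cs : List Char) (nt : List Int) (l : List Nat) :
    ∀ r : List Int, r.length = 26 →
      (l.foldl (fun r j => stepA r (cs.getD j ' ') (nt.getD j 0)) r).length = 26 := by
  induction l with
  | nil => intro r hr; exact hr
  | cons j l ih => intro r _; exact ih _ (stepA_length _ _ _)

theorem pv_ans (r : List Int) (hr : r.length = 26) :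
    (List.range 26).foldl (fun a c => min a (r.getD c 0)) ((10 : Int) ^ 9)
      = min (pvMin1 r) (10 ^ 9) := by
  have hfm : ((List.range 26).map (fun c => r.getD c 0)).foldl (fun a x => min a x) ((10 : Int) ^ 9)
      = (List.range 26).foldl (fun a c => min a (r.getD c 0)) ((10 : Int) ^ 9) := List.foldl_map
  have hmap : (List.range 26).map (fun c => r.getD c 0) = r := by
    apply List.ext_getElem (by simp [hr])
    intro i h1 h2
    simp [List.getD, List.getElem?_eq_getElem h2]
  rw [hmap] at hfm
  rw [← hfm, pv_min_start r (by intro h; rw [h] at hr; simp at hr) ((10 : Int) ^ 9), min_comm]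

theorem A_char (colors : String) (nt : List Int) (h1 : 1 ≤ colors.toList.length) :
    min_time_to_remove_balloons colors nt
      = (List.range 26).foldl (fun a c => min a
          (((List.range' 1 (colors.toList.length - 1)).foldl
              (fun r j => stepA r (colors.toList.getD j ' ') (nt.getD j 0))
              (row0f colors nt)).getD c 0)) ((10 : Int) ^ 9) := by
  have e0 : min_time_to_remove_balloons colors nt
      = (List.range 26).foldl (fun ans color => min ans
          ((((List.range' 1 (colors.toList.length - 1)).foldl
              (fun dp i => (List.range 26).foldl
                (dpInner i (colors.toList.getD i ' ') (nt.getD i 0)) dp)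
              ((List.range 26).foldl (fun dp color =>
                  if colors.toList.getD 0 ' ' ≠ Char.ofNat (65 + color) then
                    dp.set 0 ((dp.getD 0 []).set color (nt.getD 0 0))
                  else dp)
                (List.replicate colors.toList.length (List.replicate 26 ((10 : Int) ^ 9))))).getD
              (colors.toList.length - 1) []).getD color 0)) ((10 : Int) ^ 9) := rfl
  rw [e0]
  set cs := colors.toList
  set n := cs.length
  set dp0 : List (List Int) := List.replicate n (List.replicate 26 ((10 : Int) ^ 9)) with hdp0
  have hdp0len : dp0.length = n := by simp [hdp0]
  have hdp0row : ∀ j, j < n → dp0.getD j [] = List.replicate 26 ((10 : Int) ^ 9) := by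
    intro j hj
    rw [hdp0]
    exact List.getD_replicate _ (by omega)
  obtain ⟨i1, i2, i3, i4⟩ := dpInit (cs.getD 0 ' ') (nt.getD 0 0) (List.range 26) dp0
    List.nodup_range (fun c hc => List.mem_range.mp hc) (by omega)
    (by rw [hdp0row 0 (by omega)]; simp)
  set dp1 := (List.range 26).foldl (fun dp color =>
      if cs.getD 0 ' ' ≠ Char.ofNat (65 + color) then
        dp.set 0 ((dp.getD 0 []).set color (nt.getD 0 0))
      else dp) dp0 with hdp1
  have hdp1row0 : dp1.getD 0 [] = row0f colors nt := by
    apply List.ext_getElem (by rw [i3, row0f_length])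
    intro c hc1 hc2
    have hc : c < 26 := by
      have := row0f_length colors nt
      omega
    rw [← List.getD_eq_getElem _ 0 hc1, i4 c hc]
    simp only [row0f, List.getElem_map, List.getElem_range, List.mem_range, hc, true_and]
    rw [hdp0row 0 (by omega), List.getD_replicate _ hc]
  have hdp1inv : ∀ j, 1 ≤ j → j < dp1.length → dp1.getD j [] = List.replicate 26 ((10 : Int) ^ 9) := by
    intro j hj hjl
    rw [i2 j (by omega), hdp0row j (by rw [i1, hdp0len] at hjl; omega)]
  have hloop := dpLoop cs nt (n - 1) 1 dp1 (le_refl 1) (by omega) (fun j hj hjl => hdp1inv j hj hjl)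
  have harith : 1 + (n - 1) - 1 = n - 1 := by omega
  rw [harith] at hloop
  rw [hloop]
  have : dp1.getD 0 [] = row0f colors nt := hdp1row0
  rw [this]

theorem B_char (colors : String) (nt : List Int) :
    min_time_to_remove_balloons_alt colors nt
      = min (pvMin1 ((List.range' 1 (colors.toList.length - 1)).foldl
          (fun r j => stepB r (colors.toList.getD j ' ') (nt.getD j 0))
          (row0f colors nt))) ((10 : Int) ^ 9) := rfl

-- ===== VERDICT (by name: the statement is the Claim_ definition above) =====
theorem min_time_to_remove_balloons_spec : Claim_equal_min_time_to_remove_balloons := by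
  intro colors nt _ hPre
  obtain ⟨h1, _⟩ := hPre
  unfold Spec_min_time_to_remove_balloons
  rw [A_char colors nt h1, B_char colors nt]
  have hstep : (fun (r : List Int) (j : Nat) => stepB r (colors.toList.getD j ' ') (nt.getD j 0))
      = fun r j => stepA r (colors.toList.getD j ' ') (nt.getD j 0) := by
    funext r j
    exact (step_eq r _ _).symm
  rw [hstep]
  exact pv_ans _ (iter_len colors.toList nt _ (row0f colors nt) (row0f_length colors nt))
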